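-- pv_equiv track=rewrite | github.com/ETS-Hashemi/projects | SwarmMaze/3agents/collision_visualizer.py | detect_collisions
-- ===== SOURCE A (Python) =====
-- def detect_collisions(positions):
--     """Detect collisions among agents."""
--     seen = set()
--     collisions = set()
--     for pos in positions:
--         if pos in seen:
--             collisions.add(pos)
--         else:
--             seen.add(pos)
--     return collisions
-- ===== SOURCE B (Python) =====
-- def detect_collisions(positions):
--     """Detect collisions among agents."""
--     remaining = list(positions)
--     for p in dict.fromkeys(positions):
--         remaining.remove(p)
--     return set(remaining)
-- ===== Notes on version B (the rewrite author's own statement) =====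
-- stated objective: alternative
-- what changed: Replaces A's single scan maintaining two running sets (seen/collisions) by multiset subtraction: copy the list, remove one occurrence of every distinct element (dict.fromkeys order), and the leftover occurrences deduplicate into exactly the colliding positions.
import Mathlib
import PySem

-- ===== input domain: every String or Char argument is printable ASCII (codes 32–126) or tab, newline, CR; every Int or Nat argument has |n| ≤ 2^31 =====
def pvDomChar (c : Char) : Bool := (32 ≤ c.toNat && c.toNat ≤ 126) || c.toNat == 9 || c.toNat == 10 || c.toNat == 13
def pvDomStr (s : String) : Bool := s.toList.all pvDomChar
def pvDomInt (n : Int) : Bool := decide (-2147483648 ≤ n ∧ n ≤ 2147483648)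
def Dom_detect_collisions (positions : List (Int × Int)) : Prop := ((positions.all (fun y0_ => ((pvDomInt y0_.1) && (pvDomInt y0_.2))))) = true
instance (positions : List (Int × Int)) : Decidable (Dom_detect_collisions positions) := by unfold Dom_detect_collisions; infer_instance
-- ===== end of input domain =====

-- B replaces A's one-pass loop with two running sets by multiset subtraction: remove one
-- occurrence of every distinct element; the leftovers, deduplicated, are the collisions.
-- Alternative decomposition, not faster.


-- ===== PORT A =====
def detect_collisions (positions : List (Int × Int)) : List (Int × Int) :=
  (positions.foldl
    (fun (st : PySem.Set (Int × Int) × PySem.Set (Int × Int)) pos =>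
      if PySem.Set.contains st.1 pos then (st.1, PySem.Set.add st.2 pos)
      else (PySem.Set.add st.1 pos, st.2))
    (PySem.Set.empty, PySem.Set.empty)).2

-- ===== PORT B =====
-- remaining.remove(p) can never raise here (each distinct element is removed exactly once
-- from a list that contains it), so the ValueError branch is modelled by the no-op getD.
def detect_collisions_alt (positions : List (Int × Int)) : List (Int × Int) :=
  PySem.Set.ofList
    ((PySem.List.dedup positions).foldl
      (fun rem p => (PySem.List.remove? rem p).getD rem) positions)

-- ===== PRECONDITION & SPEC =====
def Spec_detect_collisions (positions : List (Int × Int)) (out : List (Int × Int)) : Prop := out = detect_collisions_alt positions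
instance (positions : List (Int × Int)) (out : List (Int × Int)) : Decidable (Spec_detect_collisions positions out) := by unfold Spec_detect_collisions; infer_instance

-- ===== CLAIM (what is proved, stated in full; the proofs are below) =====
def Claim_equal_detect_collisions : Prop := ∀ (positions : List (Int × Int)), Dom_detect_collisions positions → Spec_detect_collisions positions (detect_collisions positions)

-- ===== LEMMAS AND PROOFS =====

-- (remove? l a).getD l is Python's remove-or-raise made total; it equals List.erase
theorem pv_removeD_eq_erase (l : List (Int × Int)) (a : Int × Int) :
    (PySem.List.remove? l a).getD l = l.erase a := by
  by_cases h : a ∈ l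
  · rw [PySem.List.remove?_eq_some_erase l a h]; rfl
  · rw [(PySem.List.remove?_eq_none_iff l a).2 h, Option.getD_none, List.erase_of_not_mem h]

-- B's fold is multiset difference
theorem pv_alt_eq_diff (xs : List (Int × Int)) :
    detect_collisions_alt xs = PySem.Set.ofList (xs.diff (PySem.List.dedup xs)) := by
  unfold detect_collisions_alt
  rw [List.diff_eq_foldl]
  congr 1
  apply PySem.List.foldl_congr_mem
  intro rem p _
  exact pv_removeD_eq_erase rem p

-- the leftover list after B's removals
def pvLeft (xs : List (Int × Int)) : List (Int × Int) := xs.diff (PySem.List.dedup xs)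

theorem pv_dedup_append_singleton (xs : List (Int × Int)) (p : Int × Int) :
    PySem.List.dedup (xs ++ [p]) = PySem.List.dedup xs ++ (if p ∈ xs then [] else [p]) := by
  simp only [PySem.List.dedup_eq_ofList, PySem.Set.ofList_append_singleton, PySem.Set.add]
  by_cases h : p ∈ xs
  · rw [if_pos ((PySem.Set.contains_iff _ _).2 ((PySem.Set.mem_ofList _ _).2 h)), if_pos h,
      List.append_nil]
  · rw [if_neg (fun hc => h ((PySem.Set.mem_ofList _ _).1 ((PySem.Set.contains_iff _ _).1 hc))),
      if_neg h]

-- erasing (once each) elements present in xs commutes past an appended suffix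
theorem pv_diff_append_left (d : List (Int × Int)) :
    ∀ (xs ys : List (Int × Int)), d.Nodup → (∀ a ∈ d, a ∈ xs) →
    (xs ++ ys).diff d = xs.diff d ++ ys := by
  induction d with
  | nil => intro xs ys _ _; simp
  | cons a d ih =>
    intro xs ys hnd hmem
    rw [List.diff_cons, List.diff_cons,
      List.erase_append_left _ (hmem a (List.mem_cons_self ..))]
    apply ih _ _ hnd.of_cons
    intro b hb
    have hne : b ≠ a := by intro hba; subst hba; exact (List.nodup_cons.1 hnd).1 hb
    exact (List.mem_erase_of_ne hne).2 (hmem b (List.mem_cons_of_mem _ hb))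

theorem pvLeft_append_singleton (xs : List (Int × Int)) (p : Int × Int) :
    pvLeft (xs ++ [p]) = pvLeft xs ++ (if p ∈ xs then [p] else []) := by
  unfold pvLeft
  rw [pv_dedup_append_singleton, List.diff_append,
    pv_diff_append_left _ xs [p] (PySem.List.nodup_dedup xs)
      (fun a ha => (PySem.List.mem_dedup _ _).1 ha)]
  by_cases h : p ∈ xs
  · simp [h]
  · have hnl : p ∉ xs.diff (PySem.List.dedup xs) :=
      fun hc => h ((xs.diff_sublist _).mem hc)
    simp only [if_neg h, List.diff_cons, List.diff_nil,
      List.erase_append_right _ hnl, List.erase_cons_head, List.append_nil]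

-- the loop invariant for A's fold: seen = set(prefix), collisions = set(leftovers of prefix)
theorem pv_inv (l pre : List (Int × Int)) :
    l.foldl
      (fun (st : PySem.Set (Int × Int) × PySem.Set (Int × Int)) pos =>
        if PySem.Set.contains st.1 pos then (st.1, PySem.Set.add st.2 pos)
        else (PySem.Set.add st.1 pos, st.2))
      (PySem.Set.ofList pre, PySem.Set.ofList (pvLeft pre))
    = (PySem.Set.ofList (pre ++ l), PySem.Set.ofList (pvLeft (pre ++ l))) := by
  induction l generalizing pre with
  | nil => simp
  | cons p t ih =>
    rw [List.foldl_cons]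
    have hstep :
        (if PySem.Set.contains (PySem.Set.ofList pre) p
          then (PySem.Set.ofList pre, PySem.Set.add (PySem.Set.ofList (pvLeft pre)) p)
          else (PySem.Set.add (PySem.Set.ofList pre) p, PySem.Set.ofList (pvLeft pre)))
        = (PySem.Set.ofList (pre ++ [p]), PySem.Set.ofList (pvLeft (pre ++ [p]))) := by
      rw [PySem.Set.ofList_append_singleton, pvLeft_append_singleton]
      by_cases hp : p ∈ pre
      · rw [if_pos ((PySem.Set.contains_iff _ _).2 ((PySem.Set.mem_ofList _ _).2 hp)),
          PySem.Set.add_of_mem ((PySem.Set.mem_ofList _ _).2 hp), if_pos hp,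
          PySem.Set.ofList_append_singleton]
      · rw [if_neg (fun hc => hp ((PySem.Set.mem_ofList _ _).1
            ((PySem.Set.contains_iff _ _).1 hc))), if_neg hp, List.append_nil]
    rw [hstep, ih (pre ++ [p])]
    simp

-- ===== VERDICT (by name: the statement is the Claim_ definition above) =====
theorem detect_collisions_spec : Claim_equal_detect_collisions := by
  intro positions _
  unfold Spec_detect_collisions detect_collisions
  rw [pv_alt_eq_diff]
  have h := pv_inv positions []
  simp only [List.nil_append] at h
  rw [show ((PySem.Set.empty, PySem.Set.empty) : PySem.Set (Int × Int) × PySem.Set (Int × Int))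
      = (PySem.Set.ofList [], PySem.Set.ofList (pvLeft [])) from rfl, h]
  rfl
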